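-- pv_equiv track=rewrite | github.com/cirosantilli/project-euler-solvers | solvers/322.py | generate_lows_base5
-- ===== SOURCE A (Python) =====
-- def digits_base(x: int, base: int) -> list[int]:
--     """Return digits of x in given base, least-significant first."""
--     if x < 0:
--         raise ValueError("x must be non-negative")
--     if base <= 1:
--         raise ValueError("base must be >= 2")
--     if x == 0:
--         return [0]
--     out: list[int] = []
--     while x:
--         out.append(x % base)
--         x //= base
--     return out
--
-- def generate_lows_base5(n: int) -> tuple[list[int], int]:
--     """Enumerate all 'low parts' low < 5^L whose base-5 digits satisfy low_d >= n_d.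
--
--     L is the number of base-5 digits of n (no leading zeros). Returns (lows, B)
--     where B = 5^L.
--     """
--     n_digits = digits_base(n, 5)  # lsb
--     lows = [0]
--     pow5 = 1
--     for dmin in n_digits:
--         new: list[int] = []
--         for low in lows:
--             for d in range(dmin, 5):
--                 new.append(low + d * pow5)
--         lows = new
--         pow5 *= 5
--     return lows, pow5
-- ===== SOURCE B (Python) =====
-- def generate_lows_base5(n: int) -> tuple[list[int], int]:
--     """Enumerate all 'low parts' low < 5^L whose base-5 digits satisfy low_d >= n_d.
--
--     Mixed-radix index decoding: the j-th low is computed directly from j,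
--     no intermediate list layers.
--     """
--     if n < 0:
--         raise ValueError("x must be non-negative")
--     digs: list[int] = []
--     x = n
--     while True:
--         digs.append(x % 5)
--         x //= 5
--         if x == 0:
--             break
--     total = 1
--     for d in digs:
--         total *= 5 - d
--     lows: list[int] = []
--     for j in range(total):
--         r = j
--         low = 0
--         for i in reversed(range(len(digs))):
--             size = 5 - digs[i]
--             low += (digs[i] + r % size) * 5 ** i
--             r //= size
--         lows.append(low)
--     return lows, 5 ** len(digs)
-- ===== Notes on version B (the rewrite author's own statement) =====
-- stated objective: alternative
-- what changed: Replaces A's layer-by-layer list-doubling build (rebuilding the whole list of lows for every digit) by mixed-radix index decoding: each low is computed directly from its index j in range(total) from the digit tuple it encodes, with no intermediate list layers.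
import Mathlib
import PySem

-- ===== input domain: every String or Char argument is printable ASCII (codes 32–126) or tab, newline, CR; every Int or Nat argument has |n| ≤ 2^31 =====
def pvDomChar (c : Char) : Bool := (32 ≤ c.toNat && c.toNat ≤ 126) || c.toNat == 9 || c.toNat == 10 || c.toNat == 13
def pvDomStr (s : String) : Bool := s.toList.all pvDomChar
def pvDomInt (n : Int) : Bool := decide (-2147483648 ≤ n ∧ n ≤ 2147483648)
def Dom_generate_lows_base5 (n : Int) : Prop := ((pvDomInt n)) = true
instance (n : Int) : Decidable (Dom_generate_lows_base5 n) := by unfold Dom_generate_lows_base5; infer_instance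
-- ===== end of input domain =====

-- B replaces A's layer-by-layer list-doubling build by mixed-radix index decoding: each low
-- is computed directly from its index j in range(total); alternative algorithm, same cost.

-- ===== PORT A =====
-- while-loop of digits_base(x, 5) for x > 0 (lsb first); the x == 0 case is handled at the call site
def pvDigitsA (x : Nat) : List Int :=
  if h : x = 0 then []
  else ((x % 5 : Nat) : Int) :: pvDigitsA (x / 5)
decreasing_by exact Nat.div_lt_self (Nat.pos_of_ne_zero h) (by omega)

def generate_lows_base5 (n : Int) : List Int × Int :=
  if n < 0 then ([], 1)  -- Python raises ValueError here (digits_base); excluded by Pre_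
  else
    let n_digits : List Int := if n = 0 then [(0 : Int)] else pvDigitsA n.toNat
    n_digits.foldl
      (fun (st : List Int × Int) dmin =>
        let new := st.1.foldl
          (fun new low =>
            (PySem.List.pyRange dmin 5 1).foldl (fun new d => new ++ [low + d * st.2]) new)
          []
        (new, st.2 * 5))
      ([0], 1)

-- ===== PORT B =====
-- B's do-while digit loop (emits x % 5, then stops when x // 5 == 0)
def pvDigitsB (x : Nat) : List Int :=
  ((x % 5 : Nat) : Int) ::
    (if h : x / 5 = 0 then [] else pvDigitsB (x / 5))
decreasing_by
  exact Nat.div_lt_self (Nat.pos_of_ne_zero (by rintro rfl; simp at h)) (by omega)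

def generate_lows_base5_alt (n : Int) : List Int × Int :=
  if n < 0 then ([], 1)  -- Python raises ValueError here; excluded by Pre_
  else
    let digs := pvDigitsB n.toNat
    let total := digs.foldl (fun t d => t * (5 - d)) 1
    let lows := (PySem.List.pyRange 0 total 1).foldl
      (fun lows j =>
        -- for i in reversed(range(len(digs))): indices are valid, so digs[i] is digs.getD i 0
        let rl := ((List.range digs.length).reverse).foldl
          (fun (st : Int × Int) i =>
            (PySem.Int.floordiv st.1 (5 - digs.getD i 0),
             st.2 + (digs.getD i 0 + PySem.Int.mod st.1 (5 - digs.getD i 0)) * (5 : Int) ^ i))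
          (j, 0)
        lows ++ [rl.2])
      []
    (lows, (5 : Int) ^ digs.length)

-- ===== PRECONDITION & SPEC =====
-- Pre_ excludes n < 0, where A's digits_base raises ValueError (B raises there too).
def Pre_generate_lows_base5 (n : Int) : Prop := 0 ≤ n
instance (n : Int) : Decidable (Pre_generate_lows_base5 n) := by
  unfold Pre_generate_lows_base5; infer_instance
def pvWitness_generate_lows_base5 : Int := 7

def Spec_generate_lows_base5 (n : Int) (out : List Int × Int) : Prop := out = generate_lows_base5_alt n
instance (n : Int) (out : List Int × Int) : Decidable (Spec_generate_lows_base5 n out) := by unfold Spec_generate_lows_base5; infer_instance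

-- ===== CLAIM (what is proved, stated in full; the proofs are below) =====
def Claim_equal_generate_lows_base5 : Prop := ∀ (n : Int), Dom_generate_lows_base5 n → Pre_generate_lows_base5 n → Spec_generate_lows_base5 n (generate_lows_base5 n)

-- ===== LEMMAS AND PROOFS =====

-- A's per-digit step and B's inner decoding step, named for the proofs
def pvStepA (st : List Int × Int) (dmin : Int) : List Int × Int :=
  (st.1.foldl
    (fun new low =>
      (PySem.List.pyRange dmin 5 1).foldl (fun new d => new ++ [low + d * st.2]) new)
    [],
   st.2 * 5)

def pvStepB (ds : List Int) (st : Int × Int) (i : Nat) : Int × Int :=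
  (PySem.Int.floordiv st.1 (5 - ds.getD i 0),
   st.2 + (ds.getD i 0 + PySem.Int.mod st.1 (5 - ds.getD i 0)) * (5 : Int) ^ i)

def pvF (ds : List Int) (st : Int × Int) : Int × Int :=
  ((List.range ds.length).reverse).foldl (pvStepB ds) st

def pvT (ds : List Int) : Int := ds.foldl (fun t d => t * (5 - d)) 1

theorem pvDigitsA_zero : pvDigitsA 0 = [] := by simp [pvDigitsA]

theorem pvDigitsA_bounds : ∀ x : Nat, ∀ d ∈ pvDigitsA x, 0 ≤ d ∧ d < 5 := by
  intro x
  induction x using Nat.strong_induction_on with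
  | _ x ih =>
    rw [pvDigitsA]
    split
    · simp
    · rename_i h
      intro d hd
      rcases List.mem_cons.1 hd with rfl | hd
      · constructor
        · positivity
        · exact_mod_cast Nat.mod_lt _ (by omega)
      · exact ih (x / 5) (Nat.div_lt_self (Nat.pos_of_ne_zero h) (by omega)) d hd

theorem pvDigitsB_eq : ∀ x : Nat, pvDigitsB x = if x = 0 then [0] else pvDigitsA x := by
  intro x
  induction x using Nat.strong_induction_on with
  | _ x ih =>
    rw [pvDigitsB]
    by_cases hx : x = 0
    · subst hx; simp
    · simp only [if_neg hx]
      rw [pvDigitsA, dif_neg hx]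
      congr 1
      by_cases h5 : x / 5 = 0
      · rw [dif_pos h5, h5, pvDigitsA_zero]
      · rw [dif_neg h5, ih (x / 5) (Nat.div_lt_self (Nat.pos_of_ne_zero hx) (by omega)),
          if_neg h5]

theorem pvT_append (ds : List Int) (d : Int) : pvT (ds ++ [d]) = pvT ds * (5 - d) := by
  simp [pvT, List.foldl_append]

theorem pvT_pos : ∀ ds : List Int, (∀ d ∈ ds, d < 5) → 0 < pvT ds := by
  intro ds
  induction ds using List.reverseRecOn with
  | nil => intro _; simp [pvT]
  | append_singleton ds d ih =>
    intro h
    rw [pvT_append]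
    have h1 : 0 < pvT ds := ih (fun x hx => h x (List.mem_append_left _ hx))
    have h2 : d < 5 := h d (List.mem_append_right _ (List.mem_singleton_self d))
    have h3 : (0:Int) < 5 - d := by omega
    exact mul_pos h1 h3

-- the decoding fold: the accumulator's second component is purely additive
theorem pvF_shift (ds : List Int) :
    ∀ (is_ : List Nat) (j low : Int),
      is_.foldl (pvStepB ds) (j, low)
        = ((is_.foldl (pvStepB ds) (j, 0)).1, low + (is_.foldl (pvStepB ds) (j, 0)).2) := by
  intro is_
  induction is_ with
  | nil => intro j low; simp
  | cons i t ih =>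
    intro j low
    simp only [List.foldl_cons, pvStepB]
    rw [ih, ih (PySem.Int.floordiv j (5 - ds.getD i 0))
          (0 + (ds.getD i 0 + PySem.Int.mod j (5 - ds.getD i 0)) * (5 : Int) ^ i)]
    exact Prod.ext rfl (by ring)

theorem pvF_append (ds : List Int) (d : Int) (j low : Int) :
    pvF (ds ++ [d]) (j, low)
      = pvF ds (PySem.Int.floordiv j (5 - d),
                low + (d + PySem.Int.mod j (5 - d)) * (5 : Int) ^ ds.length) := by
  have hlen : (ds ++ [d]).length = ds.length + 1 := by simp
  have hget : (ds ++ [d]).getD ds.length 0 = d := by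
    simp [List.getD]
  unfold pvF
  rw [hlen, List.range_succ, List.reverse_append]
  simp only [List.reverse_singleton, List.singleton_append, List.foldl_cons]
  rw [pvStepB, hget]
  exact PySem.List.foldl_congr_mem _ _ _ _ (by
    intro acc i hi
    have hi' : i < ds.length := List.mem_range.1 (List.mem_reverse.1 hi)
    have hg : (ds ++ [d])[i]?.getD 0 = ds[i]?.getD 0 := by
      rw [List.getElem?_append_left hi']
    simp [pvStepB, List.getD, hg])

-- q*S+s ↦ (q,s): enumerating range(T*S) equals the nested enumeration (Nat version)
theorem pvRangeSplit {α : Type} (S : Nat) (hS : 0 < S) (f : Nat → Nat → α) :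
    ∀ T : Nat, (List.range (T * S)).map (fun j => f (j / S) (j % S))
      = (List.range T).flatMap (fun q => (List.range S).map (fun s => f q s)) := by
  intro T
  induction T with
  | zero => simp
  | succ T ih =>
    rw [Nat.succ_mul, List.range_add, List.map_append, ih, List.range_succ,
      List.flatMap_append]
    congr 1
    simp only [List.flatMap_singleton, List.map_map]
    apply List.map_congr_left
    intro s hs
    have hs' : s < S := List.mem_range.1 hs
    have h1 : (T * S + s) / S = T := by
      rw [Nat.mul_comm, Nat.mul_add_div hS, Nat.div_eq_of_lt hs']
      omega
    have h2 : (T * S + s) % S = s := by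
      rw [Nat.mul_comm, Nat.mul_add_mod, Nat.mod_eq_of_lt hs']
    simp [Function.comp, h1, h2]

theorem pvF_snd (ds : List Int) (q low : Int) :
    (pvF ds (q, low)).2 = low + (pvF ds (q, 0)).2 := by
  unfold pvF
  rw [pvF_shift]

-- the central lemma: A's fold over the digit list equals B's enumeration
theorem pvMain : ∀ ds : List Int, (∀ d ∈ ds, 0 ≤ d ∧ d < 5) →
    ds.foldl pvStepA ([0], 1)
      = ((PySem.List.pyRange 0 (pvT ds) 1).foldl
           (fun lows j => lows ++ [(pvF ds (j, 0)).2]) [],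
         (5 : Int) ^ ds.length) := by
  intro ds
  induction ds using List.reverseRecOn with
  | nil => intro _; decide
  | append_singleton ds d ih =>
    intro h
    have hds : ∀ x ∈ ds, 0 ≤ x ∧ x < 5 := fun x hx => h x (List.mem_append_left _ hx)
    have hd : 0 ≤ d ∧ d < 5 := h d (List.mem_append_right _ (List.mem_singleton_self d))
    have hT : 0 < pvT ds := pvT_pos ds (fun x hx => (hds x hx).2)
    rw [List.foldl_append, List.foldl_cons, List.foldl_nil, ih hds]
    refine Prod.ext ?_ (by simp [pvStepA, pow_succ])
    -- first components
    simp only [pvStepA, pvT_append,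
      PySem.List.foldl_append_singleton_eq_map, PySem.List.foldl_append_eq_flatMap,
      List.nil_append, List.flatMap_map]
    -- name the Nat sizes
    have hTn : pvT ds = ((pvT ds).toNat : Int) := (Int.toNat_of_nonneg hT.le).symm
    have hSn : (5 : Int) - d = (((5 - d).toNat : Nat) : Int) := by omega
    have hSpos : 0 < (5 - d).toNat := by omega
    have hmul : (pvT ds * (5 - d)).toNat = (pvT ds).toNat * (5 - d).toNat := by
      conv_lhs => rw [hTn, hSn, ← Nat.cast_mul]
      rw [Int.toNat_natCast]
    rw [PySem.List.pyRange_one 0 (pvT ds), PySem.List.pyRange_one 0 (pvT ds * (5 - d)),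
      PySem.List.pyRange_one d 5]
    simp only [Int.sub_zero, List.flatMap_map, List.map_map, hmul]
    have hstep : ∀ k : Nat,
        (pvF (ds ++ [d]) ((0 : Int) + (k : Int), 0)).2
          = (pvF ds (((k / (5 - d).toNat : Nat) : Int), 0)).2
              + (d + ((k % (5 - d).toNat : Nat) : Int)) * (5 : Int) ^ ds.length := by
      intro k
      rw [pvF_append, pvF_snd]
      have hdiv : PySem.Int.floordiv (0 + (k : Int)) (5 - d) = ((k / (5 - d).toNat : Nat) : Int) := by
        conv_lhs => rw [zero_add, hSn]
        rw [PySem.Int.floordiv_natCast]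
      have hmod : PySem.Int.mod (0 + (k : Int)) (5 - d) = ((k % (5 - d).toNat : Nat) : Int) := by
        conv_lhs => rw [zero_add, hSn]
        rw [PySem.Int.mod_natCast]
      rw [hdiv, hmod]
      ring
    refine Eq.symm ((List.map_congr_left (fun k _ => hstep k)).trans
      ((pvRangeSplit ((5 - d).toNat) hSpos
          (fun q s => (pvF ds (((q : Nat) : Int), 0)).2
            + (d + ((s : Nat) : Int)) * (5 : Int) ^ ds.length)
          ((pvT ds).toNat)).trans ?_))
    refine List.flatMap_congr ?_
    intro q _
    simp [Function.comp]

-- ===== VERDICT (by name: the statement is the Claim_ definition above) =====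
theorem generate_lows_base5_spec : Claim_equal_generate_lows_base5 := by
  unfold Claim_equal_generate_lows_base5
  intro n _ hn
  unfold Spec_generate_lows_base5
  have hnn : ¬ n < 0 := not_lt.2 hn
  simp only [generate_lows_base5, generate_lows_base5_alt, if_neg hnn]
  have hdig : pvDigitsB n.toNat = (if n = 0 then [(0 : Int)] else pvDigitsA n.toNat) := by
    rw [pvDigitsB_eq]
    by_cases h0 : n = 0
    · simp [h0]
    · have ht : n.toNat ≠ 0 := by omega
      rw [if_neg ht, if_neg h0]
  rw [hdig]
  have hb : ∀ d ∈ (if n = 0 then [(0 : Int)] else pvDigitsA n.toNat), 0 ≤ d ∧ d < 5 := by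
    split
    · simp
    · exact pvDigitsA_bounds n.toNat
  exact pvMain _ hb
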